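-- pv_equiv track=rewrite | github.com/herman181920/illy-clone-framework | scripts/import_browser_cookies.py | domain_matches
-- ===== SOURCE A (Python) =====
-- from typing import Iterable
--
-- def domain_matches(row_host: str, wanted: Iterable[str]) -> bool:
--     wanted = list(wanted)
--     if not wanted:
--         return True
--     host = row_host.lstrip(".").lower()
--     for d in wanted:
--         d = d.lstrip(".").lower()
--         if host == d or host.endswith("." + d):
--             return True
--     return False
-- ===== SOURCE B (Python) =====
-- from typing import Iterable
--
-- def domain_matches(row_host: str, wanted: Iterable[str]) -> bool:
--     wanted = list(wanted)
--     if not wanted: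
--         return True
--     wanted_set = {d.lstrip(".").lower() for d in wanted}
--     host = row_host.lstrip(".").lower()
--     candidates = [host] + [host[i + 1:] for i in range(len(host)) if host[i] == "."]
--     return any(c in wanted_set for c in candidates)
-- ===== Notes on version B (the rewrite author's own statement) =====
-- stated objective: alternative
-- what changed: Instead of scanning the wanted list and calling endswith per element, B builds a set of normalized wanted domains once and probes it with the host and each of its post-dot suffixes.
import Mathlib
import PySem

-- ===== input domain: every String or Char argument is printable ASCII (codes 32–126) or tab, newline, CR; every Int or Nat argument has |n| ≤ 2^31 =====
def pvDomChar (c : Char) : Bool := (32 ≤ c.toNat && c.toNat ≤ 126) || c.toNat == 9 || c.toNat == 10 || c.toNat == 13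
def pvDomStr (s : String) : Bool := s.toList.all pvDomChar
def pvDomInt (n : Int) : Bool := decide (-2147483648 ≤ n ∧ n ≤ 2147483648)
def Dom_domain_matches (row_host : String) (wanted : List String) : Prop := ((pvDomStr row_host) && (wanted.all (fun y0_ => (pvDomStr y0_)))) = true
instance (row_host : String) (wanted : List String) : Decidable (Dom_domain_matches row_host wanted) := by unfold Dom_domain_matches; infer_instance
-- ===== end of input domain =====

-- B replaces A's per-wanted endswith scan by a normalized wanted-set probed with the host and each of its post-dot suffixes (alternative decomposition, same observed cost).


-- ===== PORT A =====
-- s.lstrip(".") ported by hand as dropWhile (· == '.') — exact: lstrip with an explicit char set drops exactly those leading chars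
def domain_matches (row_host : String) (wanted : List String) : Bool :=
  if wanted.isEmpty then true
  else
    let host := PySem.Chars.lower (row_host.toList.dropWhile (· == '.'))
    wanted.any (fun d0 =>
      let d := PySem.Chars.lower (d0.toList.dropWhile (· == '.'))
      host == d || PySem.Chars.endswith host ('.' :: d))

-- ===== PORT B =====
-- B helper: d.lstrip(".").lower() (lstrip(".") by hand as dropWhile, exact)
def pvNorm (s : String) : List Char := PySem.Chars.lower (s.toList.dropWhile (· == '.'))

-- B helper: [host[i+1:] for i in range(len(host)) if host[i] == "."]
def pvSuffixes : List Char → List (List Char)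
  | [] => []
  | c :: rest => if c == '.' then rest :: pvSuffixes rest else pvSuffixes rest

def domain_matches_alt (row_host : String) (wanted : List String) : Bool :=
  if wanted.isEmpty then true
  else
    let wset : PySem.Set (List Char) := PySem.Set.ofList (wanted.map pvNorm)
    let host := pvNorm row_host
    (host :: pvSuffixes host).any (fun c => PySem.Set.contains wset c)

-- ===== PRECONDITION & SPEC =====
def Spec_domain_matches (row_host : String) (wanted : List String) (out : Bool) : Prop := out = domain_matches_alt row_host wanted
instance (row_host : String) (wanted : List String) (out : Bool) : Decidable (Spec_domain_matches row_host wanted out) := by unfold Spec_domain_matches; infer_instance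

-- ===== CLAIM (what is proved, stated in full; the proofs are below) =====
def Claim_equal_domain_matches : Prop := ∀ (row_host : String) (wanted : List String), Dom_domain_matches row_host wanted → Spec_domain_matches row_host wanted (domain_matches row_host wanted)

-- ===== LEMMAS AND PROOFS =====

-- d is a post-dot suffix of host exactly when '.' :: d is a suffix of host
theorem mem_pvSuffixes (d host : List Char) : d ∈ pvSuffixes host ↔ ('.' :: d) <:+ host := by
  induction host with
  | nil => simp [pvSuffixes]
  | cons c rest ih =>
    rw [List.suffix_cons_iff]
    by_cases hc : c = '.'
    · subst hc
      simp [pvSuffixes, ih]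
    · have hs : pvSuffixes (c :: rest) = pvSuffixes rest := by
        simp [pvSuffixes, hc]
      rw [hs, ih]
      simp only [List.cons.injEq]
      constructor
      · exact Or.inr
      · rintro (⟨h1, _⟩ | h)
        · exact absurd h1.symm hc
        · exact h

-- nonempty case: A's scan over wanted equals B's suffix-set probe
theorem domain_matches_main (row_host : String) (wanted : List String) :
    (wanted.any (fun d0 =>
      let d := pvNorm d0
      pvNorm row_host == d || PySem.Chars.endswith (pvNorm row_host) ('.' :: d)))
    = ((pvNorm row_host :: pvSuffixes (pvNorm row_host)).any
        (fun c => PySem.Set.contains (PySem.Set.ofList (wanted.map pvNorm)) c)) := by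
  rw [Bool.eq_iff_iff]
  simp only [List.any_eq_true, PySem.Set.contains_eq_decide, decide_eq_true_eq,
    PySem.Set.mem_ofList, List.mem_map, List.mem_cons, Bool.or_eq_true, beq_iff_eq,
    PySem.Chars.endswith_iff]
  constructor
  · rintro ⟨d0, hd0, h | h⟩
    · exact ⟨_, Or.inl h.symm, d0, hd0, rfl⟩
    · exact ⟨_, Or.inr ((mem_pvSuffixes _ _).mpr h), d0, hd0, rfl⟩
  · rintro ⟨c, hc, d0, hd0, rfl⟩
    refine ⟨d0, hd0, ?_⟩
    rcases hc with h | h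
    · exact Or.inl h.symm
    · exact Or.inr ((mem_pvSuffixes _ _).mp h)

-- ===== VERDICT (by name: the statement is the Claim_ definition above) =====
theorem domain_matches_spec : Claim_equal_domain_matches := by
  intro row_host wanted _
  unfold Spec_domain_matches domain_matches domain_matches_alt
  by_cases hw : wanted.isEmpty
  · simp [hw]
  · simp only [hw, Bool.false_eq_true, if_false]
    exact domain_matches_main row_host wanted
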